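-- pv_equiv track=rewrite | github.com/jayyanar/llmeval-bedrock-summarize-scale | sam-app/functions/model1/app.py | get_supported_metrics
-- ===== SOURCE A (Python) =====
-- def get_supported_metrics(model_id):
--     # Define supported metrics for each model family
--     metrics = {
--         "anthropic": ["Builtin.Accuracy", "Builtin.Robustness", "Builtin.Toxicity"],
--         "amazon": ["Builtin.Accuracy", "Builtin.Robustness", "Builtin.Toxicity"],
--         "cohere": ["Builtin.Accuracy", "Builtin.Robustness"],
--         "ai21": ["Builtin.Accuracy", "Builtin.Robustness"],
--         "meta": ["Builtin.Accuracy", "Builtin.Robustness"],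
--         "mistral": ["Builtin.Accuracy", "Builtin.Robustness"]
--     }
--
--     for family, supported_metrics in metrics.items():
--         if model_id.startswith(family):
--             return supported_metrics
--
--     return ["Builtin.Accuracy", "Builtin.Robustness"]
-- ===== SOURCE B (Python) =====
-- def get_supported_metrics(model_id):
--     # Only two distinct answers exist: three metrics for anthropic/amazon, two otherwise.
--     if model_id.startswith(("anthropic", "amazon")):
--         return ["Builtin.Accuracy", "Builtin.Robustness", "Builtin.Toxicity"]
--     return ["Builtin.Accuracy", "Builtin.Robustness"]
-- ===== Notes on version B (the rewrite author's own statement) =====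
-- stated objective: simpler
-- what changed: Drops the six-entry dict and the loop over its items; B is a single prefix conditional returning one of the two distinct lists A can produce.
import Mathlib
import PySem

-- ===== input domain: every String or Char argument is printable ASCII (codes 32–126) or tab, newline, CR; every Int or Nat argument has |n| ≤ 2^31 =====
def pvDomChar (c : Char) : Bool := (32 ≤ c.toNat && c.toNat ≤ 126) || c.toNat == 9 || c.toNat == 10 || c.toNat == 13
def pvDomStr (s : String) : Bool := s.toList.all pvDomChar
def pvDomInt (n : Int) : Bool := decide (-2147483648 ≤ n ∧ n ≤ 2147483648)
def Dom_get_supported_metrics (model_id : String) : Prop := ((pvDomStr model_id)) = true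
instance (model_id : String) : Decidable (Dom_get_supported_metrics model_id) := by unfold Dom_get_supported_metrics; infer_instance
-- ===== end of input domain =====

-- B drops A's six-entry dict/loop for a single two-case prefix conditional (simpler, same values).
-- ===== PORT A =====
-- the dict literal of A, as an association list in insertion order
def pvMetricsTable : List (String × List String) :=
  [("anthropic", ["Builtin.Accuracy", "Builtin.Robustness", "Builtin.Toxicity"]),
   ("amazon",    ["Builtin.Accuracy", "Builtin.Robustness", "Builtin.Toxicity"]),
   ("cohere",    ["Builtin.Accuracy", "Builtin.Robustness"]),
   ("ai21",      ["Builtin.Accuracy", "Builtin.Robustness"]),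
   ("meta",      ["Builtin.Accuracy", "Builtin.Robustness"]),
   ("mistral",   ["Builtin.Accuracy", "Builtin.Robustness"])]

-- the 'for family, supported_metrics in metrics.items(): if model_id.startswith(family): return'
def pvFamLoop (model_id : String) : List (String × List String) → List String
  | [] => ["Builtin.Accuracy", "Builtin.Robustness"]
  | (family, supported_metrics) :: rest =>
      if PySem.Str.startswith model_id family then supported_metrics
      else pvFamLoop model_id rest

def get_supported_metrics (model_id : String) : List String :=
  pvFamLoop model_id pvMetricsTable

-- ===== PORT B =====
def get_supported_metrics_alt (model_id : String) : List String :=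
  if PySem.Str.startswith model_id "anthropic" || PySem.Str.startswith model_id "amazon" then
    ["Builtin.Accuracy", "Builtin.Robustness", "Builtin.Toxicity"]
  else
    ["Builtin.Accuracy", "Builtin.Robustness"]

-- ===== PRECONDITION & SPEC =====
def Spec_get_supported_metrics (model_id : String) (out : List String) : Prop := out = get_supported_metrics_alt model_id
instance (model_id : String) (out : List String) : Decidable (Spec_get_supported_metrics model_id out) := by unfold Spec_get_supported_metrics; infer_instance

-- ===== CLAIM (what is proved, stated in full; the proofs are below) =====
def Claim_equal_get_supported_metrics : Prop := ∀ (model_id : String), Dom_get_supported_metrics model_id → Spec_get_supported_metrics model_id (get_supported_metrics model_id)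

-- ===== LEMMAS AND PROOFS =====

-- ===== VERDICT (by name: the statement is the Claim_ definition above) =====
theorem get_supported_metrics_spec : Claim_equal_get_supported_metrics := by
  intro model_id _
  show pvFamLoop model_id pvMetricsTable = get_supported_metrics_alt model_id
  simp only [pvMetricsTable, pvFamLoop, get_supported_metrics_alt]
  split_ifs <;> simp_all
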